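-- pv_equiv track=rewrite | github.com/Gyaha/AOC2015 | day18.py | count_on_after_x
-- ===== SOURCE A (Python) =====
-- def read_data(s: str) -> list:
--     data = []
--     for l in s.splitlines():
--         data.append([1 if a == "#" else 0 for a in l])
--     return data
--
-- def take_step(lights: list) -> list:
--     new_lights = [["x" for _ in range(len(lights[0]))] for _ in range(len(lights))]
--     for y in range(len(lights)):
--         for x in range(len(lights[0])):
--             c = lights[y][x]
--             a = count_around(lights, y, x)
--             if c:
--                 if a == 2 or a == 3:
--                     new_lights[y][x] = 1
--                 else:
--                     new_lights[y][x] = 0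
--             else:
--                 if a == 3:
--                     new_lights[y][x] = 1
--                 else:
--                     new_lights[y][x] = 0
--     return new_lights
--
-- def count_around(lights, y, x) -> int:
--     n = 0
--     n += count_x_y(lights, y - 1, x + 1)
--     n += count_x_y(lights, y - 1, x)
--     n += count_x_y(lights, y - 1, x - 1)
--     n += count_x_y(lights, y + 1, x + 1)
--     n += count_x_y(lights, y + 1, x)
--     n += count_x_y(lights, y + 1, x - 1)
--     n += count_x_y(lights, y, x + 1)
--     n += count_x_y(lights, y, x - 1)
--     return n
--
-- def count_x_y(lights, y, x) -> int:
--     if x < 0 or x >= len(lights[0]) or y < 0 or y >= len(lights):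
--         return 0
--     return lights[y][x]
--
-- def count_on_after_x(s: str, t: int) -> int:
--     lights = read_data(s)
--     for _ in range(t):
--         lights = take_step(lights)
--     n = 0
--     for l in range(len(lights)):
--         n += sum(lights[l])
--     return n
-- ===== SOURCE B (Python) =====
-- def step_cell(c, box):
--     n = box - c
--     return 1 if n == 3 or (c and n == 2) else 0
--
-- def count_on_after_x(s: str, t: int) -> int:
--     grid = [[1 if a == "#" else 0 for a in l] for l in s.splitlines()]
--     for _ in range(t):
--         h = len(grid)
--         w = len(grid[0]) if grid else 0
--         hb = [[(row[x - 1] if x > 0 else 0) + row[x] + (row[x + 1] if x + 1 < w else 0)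
--                for x in range(w)]
--               for row in grid]
--         grid = [[step_cell(grid[y][x],
--                            (hb[y - 1][x] if y > 0 else 0) + hb[y][x]
--                            + (hb[y + 1][x] if y + 1 < h else 0))
--                  for x in range(w)]
--                 for y in range(h)]
--     total = 0
--     for row in grid:
--         total += sum(row)
--     return total
-- ===== Notes on version B (the rewrite author's own statement) =====
-- stated objective: faster
-- what changed: A computes each cell's neighbour count by an 8-way per-cell gather through bounds-checked helper calls (count_around/count_x_y); B decomposes the 3x3 stencil into two separable passes - a horizontal 3-sum per row, then per cell a vertical 3-sum of the blurred rows, subtracting the cell itself to get the neighbour count - sharing the row sums between neighbouring cells and removing the per-neighbour function calls.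
import Mathlib
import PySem

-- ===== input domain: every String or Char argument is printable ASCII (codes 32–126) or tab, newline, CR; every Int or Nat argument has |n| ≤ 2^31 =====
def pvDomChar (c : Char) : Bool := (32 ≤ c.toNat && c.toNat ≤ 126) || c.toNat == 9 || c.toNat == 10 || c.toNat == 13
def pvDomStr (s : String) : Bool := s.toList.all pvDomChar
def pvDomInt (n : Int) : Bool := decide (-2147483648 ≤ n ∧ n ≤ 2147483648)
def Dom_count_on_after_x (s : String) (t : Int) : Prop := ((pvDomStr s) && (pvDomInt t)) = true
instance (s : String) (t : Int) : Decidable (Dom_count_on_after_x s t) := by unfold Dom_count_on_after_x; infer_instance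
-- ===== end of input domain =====

-- B replaces A's per-cell 8-neighbour gather (count_around) by a separable two-pass step:
-- one pass of horizontal 3-sums per row, then per cell a vertical 3-sum of the blurred rows
-- (the neighbour count is that box sum minus the cell itself); same asymptotics, a different
-- decomposition of the stencil.
-- Shared low-level cell accessor (both Pythons read grid[y][x]; inside Pre_ all reads are in bounds):
def cellAt (g : List (List Int)) (y x : Nat) : Int := (g.getD y []).getD x 0

-- ===== PORT A =====
def read_data (s : String) : List (List Int) :=
  (PySem.Str.splitlines s).map (fun l => l.toList.map (fun a => if a == '#' then (1 : Int) else 0))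

def count_x_y (g : List (List Int)) (y x : Int) : Int :=
  if x < 0 ∨ ((g.headD []).length : Int) ≤ x ∨ y < 0 ∨ (g.length : Int) ≤ y then 0
  else cellAt g y.toNat x.toNat

def count_around (g : List (List Int)) (y x : Int) : Int :=
  0 + count_x_y g (y - 1) (x + 1) + count_x_y g (y - 1) x + count_x_y g (y - 1) (x - 1)
    + count_x_y g (y + 1) (x + 1) + count_x_y g (y + 1) x + count_x_y g (y + 1) (x - 1)
    + count_x_y g y (x + 1) + count_x_y g y (x - 1)

def take_step (g : List (List Int)) : List (List Int) :=
  (List.range g.length).map (fun y =>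
    (List.range (g.headD []).length).map (fun x =>
      let c := cellAt g y x
      let a := count_around g (y : Int) (x : Int)
      if c ≠ 0 then (if a = 2 ∨ a = 3 then 1 else 0) else (if a = 3 then 1 else 0)))

def count_on_after_x (s : String) (t : Int) : Int :=
  let lights := (List.range t.toNat).foldl (fun g _ => take_step g) (read_data s)
  (List.range lights.length).foldl (fun n l => n + (lights.getD l []).sum) 0

-- ===== PORT B =====
def step_cell (c box : Int) : Int :=
  let n := box - c
  if n = 3 ∨ (c ≠ 0 ∧ n = 2) then 1 else 0

def blur_row (w : Nat) (row : List Int) : List Int :=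
  (List.range w).map (fun x =>
    (if 0 < x then row.getD (x - 1) 0 else 0) + row.getD x 0
      + (if x + 1 < w then row.getD (x + 1) 0 else 0))

def step_alt (g : List (List Int)) : List (List Int) :=
  let h := g.length
  let w := (g.headD []).length
  let hb := g.map (blur_row w)
  (List.range h).map (fun y =>
    (List.range w).map (fun x =>
      step_cell (cellAt g y x)
        ((if 0 < y then cellAt hb (y - 1) x else 0) + cellAt hb y x
          + (if y + 1 < h then cellAt hb (y + 1) x else 0))))

def count_on_after_x_alt (s : String) (t : Int) : Int :=
  let grid := (List.range t.toNat).foldl (fun g _ => step_alt g)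
    ((PySem.Str.splitlines s).map (fun l => l.toList.map (fun a => if a == '#' then (1 : Int) else 0)))
  grid.foldl (fun n row => n + row.sum) 0

-- ===== PRECONDITION & SPEC =====
-- Pre_ excludes exactly the inputs where A raises IndexError: t > 0 with some line shorter
-- than the first line (count_x_y / take_step then index past that row's end).
def Pre_count_on_after_x (s : String) (t : Int) : Prop :=
  0 < t →
    ∀ l ∈ PySem.Str.splitlines s,
      ((PySem.Str.splitlines s).headD "").toList.length ≤ l.toList.length
instance (s : String) (t : Int) : Decidable (Pre_count_on_after_x s t) := by
  unfold Pre_count_on_after_x; infer_instance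

def pvWitness_count_on_after_x : String × Int := ("##\n##", 1)

def Spec_count_on_after_x (s : String) (t : Int) (out : Int) : Prop := out = count_on_after_x_alt s t
instance (s : String) (t : Int) (out : Int) : Decidable (Spec_count_on_after_x s t out) := by
  unfold Spec_count_on_after_x; infer_instance

-- ===== CLAIM (what is proved, stated in full; the proofs are below) =====
def Claim_equal_count_on_after_x : Prop := ∀ (s : String) (t : Int), Dom_count_on_after_x s t → Pre_count_on_after_x s t → Spec_count_on_after_x s t (count_on_after_x s t)

-- ===== LEMMAS AND PROOFS =====

theorem count_x_y_eval (g : List (List Int)) (y x : Int) :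
    count_x_y g y x = if 0 ≤ y ∧ y < (g.length : Int) ∧ 0 ≤ x ∧ x < ((g.headD []).length : Int)
      then cellAt g y.toNat x.toNat else 0 := by
  unfold count_x_y; split_ifs <;> first | rfl | omega

-- one blurred-row read is the guarded horizontal 3-sum of the underlying row
theorem cellAt_map_blur (g : List (List Int)) (w : Nat) (y x : Nat)
    (hx : x < w) :
    cellAt (g.map (blur_row w)) y x
      = (if 0 < x then cellAt g y (x - 1) else 0) + cellAt g y x
        + (if x + 1 < w then cellAt g y (x + 1) else 0) := by
  unfold cellAt
  by_cases hy : y < g.length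
  · have h1 : (g.map (blur_row w)).getD y [] = blur_row w (g.getD y []) := by
      rw [List.getD_eq_getElem?_getD, List.getElem?_map, List.getElem?_eq_getElem hy]
      simp [List.getD_eq_getElem?_getD, List.getElem?_eq_getElem hy]
    rw [h1]
    unfold blur_row
    rw [List.getD_eq_getElem?_getD, List.getElem?_map, List.getElem?_range hx]
    simp
  · have h1 : (g.map (blur_row w)).getD y [] = [] := by
      rw [List.getD_eq_getElem?_getD, List.getElem?_eq_none (by simpa using Nat.le_of_not_lt hy)]
      rfl
    have h2 : g.getD y [] = [] := by
      rw [List.getD_eq_getElem?_getD, List.getElem?_eq_none (by omega)]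
      rfl
    rw [h1, h2]
    simp

-- B's 3×3 box sum equals A's 8-neighbour sum plus the centre cell
theorem box_eq (g : List (List Int)) (y x : Nat)
    (hy : y < g.length) (hx : x < (g.headD []).length) :
    (if 0 < y then cellAt (g.map (blur_row (g.headD []).length)) (y - 1) x else 0)
      + cellAt (g.map (blur_row (g.headD []).length)) y x
      + (if y + 1 < g.length then cellAt (g.map (blur_row (g.headD []).length)) (y + 1) x else 0)
    = count_around g (y : Int) (x : Int) + cellAt g y x := by
  have cxy : ∀ (a b : Int), count_x_y g a b
      = if 0 ≤ a ∧ a < (g.length : Int) ∧ 0 ≤ b ∧ b < ((g.headD []).length : Int)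
          then cellAt g a.toNat b.toNat else 0 := count_x_y_eval g
  unfold count_around
  rw [cxy, cxy, cxy, cxy, cxy, cxy, cxy, cxy]
  rw [cellAt_map_blur g _ (y - 1) x hx, cellAt_map_blur g _ y x hx,
      cellAt_map_blur g _ (y + 1) x hx]
  have ty1 : ((y : Int) - 1).toNat = y - 1 := by omega
  have ty2 : ((y : Int) + 1).toNat = y + 1 := by omega
  have tx1 : ((x : Int) - 1).toNat = x - 1 := by omega
  have tx2 : ((x : Int) + 1).toNat = x + 1 := by omega
  simp only [ty1, ty2, tx1, tx2, Int.toNat_natCast]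
  have d1 : (0 ≤ (y:Int) - 1 ∧ (y:Int) - 1 < (g.length : Int) ∧ 0 ≤ (x:Int) + 1 ∧ (x:Int) + 1 < ((g.headD []).length : Int)) ↔ (0 < y ∧ x + 1 < (g.headD []).length) := by omega
  have d2 : (0 ≤ (y:Int) - 1 ∧ (y:Int) - 1 < (g.length : Int) ∧ 0 ≤ (x:Int) ∧ (x:Int) < ((g.headD []).length : Int)) ↔ (0 < y ∧ True) := by
    constructor
    · intro h; exact ⟨by omega, trivial⟩
    · intro h; omega
  have d3 : (0 ≤ (y:Int) - 1 ∧ (y:Int) - 1 < (g.length : Int) ∧ 0 ≤ (x:Int) - 1 ∧ (x:Int) - 1 < ((g.headD []).length : Int)) ↔ (0 < y ∧ 0 < x) := by omega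
  have d4 : (0 ≤ (y:Int) + 1 ∧ (y:Int) + 1 < (g.length : Int) ∧ 0 ≤ (x:Int) + 1 ∧ (x:Int) + 1 < ((g.headD []).length : Int)) ↔ (y + 1 < g.length ∧ x + 1 < (g.headD []).length) := by omega
  have d5 : (0 ≤ (y:Int) + 1 ∧ (y:Int) + 1 < (g.length : Int) ∧ 0 ≤ (x:Int) ∧ (x:Int) < ((g.headD []).length : Int)) ↔ (y + 1 < g.length ∧ True) := by
    constructor
    · intro h; exact ⟨by omega, trivial⟩
    · intro h; omega
  have d6 : (0 ≤ (y:Int) + 1 ∧ (y:Int) + 1 < (g.length : Int) ∧ 0 ≤ (x:Int) - 1 ∧ (x:Int) - 1 < ((g.headD []).length : Int)) ↔ (y + 1 < g.length ∧ 0 < x) := by omega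
  have d7 : (0 ≤ (y:Int) ∧ (y:Int) < (g.length : Int) ∧ 0 ≤ (x:Int) + 1 ∧ (x:Int) + 1 < ((g.headD []).length : Int)) ↔ (True ∧ x + 1 < (g.headD []).length) := by
    constructor
    · intro h; exact ⟨trivial, by omega⟩
    · intro h; omega
  have d8 : (0 ≤ (y:Int) ∧ (y:Int) < (g.length : Int) ∧ 0 ≤ (x:Int) - 1 ∧ (x:Int) - 1 < ((g.headD []).length : Int)) ↔ (True ∧ 0 < x) := by
    constructor
    · intro h; exact ⟨trivial, by omega⟩
    · intro h; omega
  simp only [d1, d2, d3, d4, d5, d6, d7, d8, true_and, and_true]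
  by_cases h1 : 0 < y <;> by_cases h2 : y + 1 < g.length <;>
    by_cases h3 : 0 < x <;> by_cases h4 : x + 1 < (g.headD []).length <;>
    simp only [h1, h2, h3, h4, if_true, if_false, and_true, and_false] <;>
    ring

theorem take_step_eq_step_alt (g : List (List Int)) : take_step g = step_alt g := by
  unfold take_step step_alt
  apply List.map_congr_left
  intro y hy
  apply List.map_congr_left
  intro x hx
  rw [List.mem_range] at hy hx
  have hbox := box_eq g y x hy hx
  unfold step_cell
  rw [hbox]
  simp only []
  have harith : count_around g (y : Int) (x : Int) + cellAt g y x - cellAt g y x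
      = count_around g (y : Int) (x : Int) := by ring
  rw [harith]
  by_cases hc : cellAt g y x ≠ 0 <;>
    simp only [hc, if_true, if_false, ne_eq, not_false_iff] <;>
    split_ifs <;> first | rfl | tauto

theorem fold_eq (n : Nat) (g : List (List Int)) :
    (List.range n).foldl (fun g _ => take_step g) g
      = (List.range n).foldl (fun g _ => step_alt g) g := by
  induction n generalizing g with
  | zero => rfl
  | succ m ih =>
    have h1 : List.range (m + 1) = 0 :: (List.range m).map (· + 1) := by
      simp [List.range_succ_eq_map]
    rw [h1]
    simp only [List.foldl_cons, List.foldl_map]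
    rw [take_step_eq_step_alt g]
    exact ih (step_alt g)

theorem map_getD_range {α : Type} (l : List α) (d : α) :
    (List.range l.length).map (fun i => l.getD i d) = l := by
  apply List.ext_getElem
  · simp
  · intro i h1 h2
    simp [List.getD_eq_getElem?_getD, List.getElem?_eq_getElem h2]

theorem sum_range_getD (g : List (List Int)) :
    (List.range g.length).foldl (fun n l => n + (g.getD l []).sum) 0
      = g.foldl (fun n row => n + row.sum) 0 := by
  conv_rhs => rw [← map_getD_range g []]
  rw [List.foldl_map]

-- ===== VERDICT (by name: the statement is the Claim_ definition above) =====
theorem count_on_after_x_spec : Claim_equal_count_on_after_x := by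
  intro s t _dom _hpre
  unfold Spec_count_on_after_x count_on_after_x count_on_after_x_alt
  have hparse : read_data s
      = (PySem.Str.splitlines s).map (fun l => l.toList.map (fun a => if a == '#' then (1 : Int) else 0)) := rfl
  rw [← hparse]
  rw [fold_eq t.toNat (read_data s)]
  exact sum_range_getD _
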